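-- pv_equiv track=rewrite | github.com/Noruzzang/Aiffelthon_qfit | server/pymunk_sim6.py | check_3cushion_score
-- ===== SOURCE A (Python) =====
-- def check_3cushion_score(log_list, cue_choice="white"):
--     if cue_choice=="white":
--         obj_balls = ["R","Y"]
--     else:
--         obj_balls = ["R","W"]
--
--     cushion_count = 0
--     hit_set = set()
--     second_ball_hit = False
--
--     for ch in log_list:
--         if ch=="C":
--             cushion_count+=1
--         else:
--             if ch in obj_balls:
--                 if ch not in hit_set:
--                     hit_set.add(ch)
--                     if len(hit_set)==2:
--                         if cushion_count>=3:
--                             second_ball_hit=True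
--                         else:
--                             return False,"두 번째 목적구 전 쿠션 부족"
--         if second_ball_hit:
--             break
--
--     if second_ball_hit:
--         return True,"정상 득점(3쿠션)"
--     else:
--         if len(hit_set)==0:
--             return False,"목적구 전혀 못 맞힘"
--         elif len(hit_set)==1:
--             return False,"목적구 1개만 맞힘"
--         else:
--             return False,"쿠션 3회 미만"
-- ===== SOURCE B (Python) =====
-- def check_3cushion_score(log_list, cue_choice="white"):
--     targets = {"R", "Y"} if cue_choice == "white" else {"R", "W"}
--     seen = set()
--     idx = None
--     for i, ch in enumerate(log_list):
--         if ch in targets: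
--             seen.add(ch)
--             if len(seen) == 2:
--                 idx = i
--                 break
--     if idx is None:
--         if len(seen) == 0:
--             return False, "목적구 전혀 못 맞힘"
--         return False, "목적구 1개만 맞힘"
--     if log_list[:idx].count("C") >= 3:
--         return True, "정상 득점(3쿠션)"
--     return False, "두 번째 목적구 전 쿠션 부족"
-- ===== Notes on version B (the rewrite author's own statement) =====
-- stated objective: simpler
-- what changed: Replaces the interleaved cushion-counting/flag state machine by a locate-then-count decomposition: first find the index of the second distinct object ball, then count 'C' in the prefix before it; the dead '3-cushion-shortage after loop' branch disappears.
import Mathlib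
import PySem

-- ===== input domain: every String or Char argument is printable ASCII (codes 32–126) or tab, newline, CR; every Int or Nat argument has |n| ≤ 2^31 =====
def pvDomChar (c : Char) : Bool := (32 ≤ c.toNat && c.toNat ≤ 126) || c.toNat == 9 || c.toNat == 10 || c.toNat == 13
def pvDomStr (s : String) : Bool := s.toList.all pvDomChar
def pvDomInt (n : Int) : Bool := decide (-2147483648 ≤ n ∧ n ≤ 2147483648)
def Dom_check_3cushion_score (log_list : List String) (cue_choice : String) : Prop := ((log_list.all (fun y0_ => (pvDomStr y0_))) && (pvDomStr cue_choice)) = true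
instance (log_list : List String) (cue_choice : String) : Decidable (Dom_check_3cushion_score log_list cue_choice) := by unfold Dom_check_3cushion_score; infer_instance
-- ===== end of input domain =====

-- B replaces A's interleaved cushion-counting/flag state machine by a locate-then-count
-- decomposition (find the second distinct object ball, then count 'C' in the prefix); simpler.

-- ===== PORT A =====
-- A's for-loop: cushion counter, hit set and early return/break, transcribed as structural recursion.
def pvALoop (obj : List String) (xs : List String) (c : Int) (hs : PySem.Set String) : Bool × String :=
  match xs with
  | [] =>
    if PySem.Set.len hs == 0 then (false, "목적구 전혀 못 맞힘")
    else if PySem.Set.len hs == 1 then (false, "목적구 1개만 맞힘")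
    else (false, "쿠션 3회 미만")
  | ch :: rest =>
    if ch == "C" then pvALoop obj rest (c + 1) hs
    else if obj.contains ch && !(PySem.Set.contains hs ch) then
      let hs' := PySem.Set.add hs ch
      if PySem.Set.len hs' == 2 then
        if c ≥ 3 then (true, "정상 득점(3쿠션)")
        else (false, "두 번째 목적구 전 쿠션 부족")
      else pvALoop obj rest c hs'
    else pvALoop obj rest c hs

def check_3cushion_score (log_list : List String) (cue_choice : String) : Bool × String :=
  let obj_balls := if cue_choice == "white" then ["R", "Y"] else ["R", "W"]
  pvALoop obj_balls log_list 0 PySem.Set.empty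

-- ===== PORT B =====
-- B phase 1: find the index of the second distinct object ball (enumerate + break).
def pvBFind (targets : PySem.Set String) (xs : List String) (seen : PySem.Set String) (i : Nat) :
    Option Nat × PySem.Set String :=
  match xs with
  | [] => (none, seen)
  | ch :: rest =>
    if PySem.Set.contains targets ch then
      let s' := PySem.Set.add seen ch
      if PySem.Set.len s' == 2 then (some i, s')
      else pvBFind targets rest s' (i + 1)
    else pvBFind targets rest seen (i + 1)

def check_3cushion_score_alt (log_list : List String) (cue_choice : String) : Bool × String :=
  let targets := if cue_choice == "white" then PySem.Set.ofList ["R", "Y"] else PySem.Set.ofList ["R", "W"]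
  match pvBFind targets log_list PySem.Set.empty 0 with
  | (none, seen) =>
    if PySem.Set.len seen == 0 then (false, "목적구 전혀 못 맞힘")
    else (false, "목적구 1개만 맞힘")
  | (some i, _) =>
    if PySem.List.count (PySem.List.slice log_list none (some (i : Int))) "C" ≥ 3 then
      (true, "정상 득점(3쿠션)")
    else (false, "두 번째 목적구 전 쿠션 부족")

-- ===== PRECONDITION & SPEC =====
def Spec_check_3cushion_score (log_list : List String) (cue_choice : String) (out : Bool × String) : Prop := out = check_3cushion_score_alt log_list cue_choice
instance (log_list : List String) (cue_choice : String) (out : Bool × String) : Decidable (Spec_check_3cushion_score log_list cue_choice out) := by unfold Spec_check_3cushion_score; infer_instance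

-- ===== CLAIM (what is proved, stated in full; the proofs are below) =====
def Claim_equal_check_3cushion_score : Prop := ∀ (log_list : List String) (cue_choice : String), Dom_check_3cushion_score log_list cue_choice → Spec_check_3cushion_score log_list cue_choice (check_3cushion_score log_list cue_choice)

-- ===== LEMMAS AND PROOFS =====

theorem pvBFind_succ (t : PySem.Set String) (xs : List String) :
    ∀ (s : PySem.Set String) (i : Nat),
    pvBFind t xs s (i + 1) = ((pvBFind t xs s i).1.map (· + 1), (pvBFind t xs s i).2) := by
  induction xs with
  | nil => intro s i; simp [pvBFind]
  | cons ch rest ih =>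
    intro s i
    simp only [pvBFind]
    split
    · split
      · simp
      · exact ih _ _
    · exact ih _ _

theorem pvLoop_eq (obj : List String) (hC : obj.contains "C" = false) (xs : List String) :
    ∀ (c : Int) (hs : PySem.Set String), hs.length ≤ 1 →
    pvALoop obj xs c hs =
      (match pvBFind obj xs hs 0 with
      | (none, s) =>
        if PySem.Set.len s == 0 then (false, "목적구 전혀 못 맞힘")
        else (false, "목적구 1개만 맞힘")
      | (some i, _) =>
        if c + ((xs.take i).count "C" : Int) ≥ 3 then (true, "정상 득점(3쿠션)")
        else (false, "두 번째 목적구 전 쿠션 부족")) := by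
  induction xs with
  | nil =>
    intro c hs hlen
    match hs, hlen with
    | [], _ => simp [pvALoop, pvBFind, PySem.Set.len]
    | [a], _ => simp [pvALoop, pvBFind, PySem.Set.len]
  | cons ch rest ih =>
    intro c hs hlen
    by_cases hc : ch = "C"
    · subst hc
      have hobj : PySem.Set.contains obj "C" = false := by
        simpa [PySem.Set.contains_eq_listContains] using hC
      simp only [pvALoop, pvBFind, beq_self_eq_true, if_true, hobj, Bool.false_eq_true, if_false]
      rw [pvBFind_succ, ih (c + 1) hs hlen]
      rcases hres : pvBFind obj rest hs 0 with ⟨o, s⟩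
      cases o with
      | none => simp
      | some j =>
        simp only [Option.map_some, List.take_succ_cons, List.count_cons, beq_self_eq_true,
          if_true]
        have hcond : (c + 1 + ((rest.take j).count "C" : Int) ≥ 3) ↔
            (c + (((rest.take j).count "C" + 1 : Nat) : Int) ≥ 3) := by push_cast; omega
        rw [if_congr hcond rfl rfl]
    · have hbeq : (ch == "C") = false := by simp [hc]
      have step_same : ∀ s' : PySem.Set String, s'.length ≤ 1 →
          pvALoop obj rest c s' =
          (match pvBFind obj rest s' 1 with
          | (none, s) =>
            if PySem.Set.len s == 0 then (false, "목적구 전혀 못 맞힘")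
            else (false, "목적구 1개만 맞힘")
          | (some i, _) =>
            if c + (((ch :: rest).take i).count "C" : Int) ≥ 3 then (true, "정상 득점(3쿠션)")
            else (false, "두 번째 목적구 전 쿠션 부족")) := by
        intro s' hlen'
        rw [pvBFind_succ, ih c s' hlen']
        rcases hres : pvBFind obj rest s' 0 with ⟨o, s⟩
        cases o with
        | none => simp
        | some j =>
          simp only [Option.map_some, List.take_succ_cons, List.count_cons, hbeq,
            Bool.false_eq_true, if_false]
          simp
      by_cases hm : obj.contains ch
      · have hmem2 : ch ∈ obj := by simpa using hm
        by_cases hseen : ch ∈ hs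
        · have hadd : PySem.Set.add hs ch = hs := PySem.Set.add_of_mem hseen
          have hlen2 : ((hs.length : Int) ≠ 2) := by omega
          have hL : pvALoop obj (ch :: rest) c hs = pvALoop obj rest c hs := by
            simp [pvALoop, hbeq, hseen]
          have hR : pvBFind obj (ch :: rest) hs 0 = pvBFind obj rest hs 1 := by
            simp [pvBFind, hmem2, hadd, PySem.Set.len, hlen2]
          rw [hL, hR]
          exact step_same hs hlen
        · have hadd : PySem.Set.add hs ch = hs ++ [ch] := PySem.Set.add_of_not_mem hseen
          rcases hs with _ | ⟨a, _ | ⟨b, t⟩⟩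
          · -- hs = []: the new set has one element, both sides recurse
            have hL : pvALoop obj (ch :: rest) c [] = pvALoop obj rest c [ch] := by
              simp [pvALoop, hbeq, hmem2, hseen, PySem.Set.len]
            have hR : pvBFind obj (ch :: rest) ([] : PySem.Set String) 0 =
                pvBFind obj rest [ch] 1 := by
              simp [pvBFind, hmem2, PySem.Set.len]
            rw [hL, hR]
            exact step_same [ch] (by simp)
          · -- hs = [a]: the second distinct object ball is hit here
            have hL : pvALoop obj (ch :: rest) c [a] =
                (if c ≥ 3 then (true, "정상 득점(3쿠션)")
                 else (false, "두 번째 목적구 전 쿠션 부족")) := by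
              simp [pvALoop, hbeq, hmem2, hseen, PySem.Set.len]
            have hR : pvBFind obj (ch :: rest) ([a] : PySem.Set String) 0 = (some 0, [a, ch]) := by
              simp [pvBFind, hmem2, hadd, PySem.Set.len]
            rw [hL, hR]
            norm_num
          · simp at hlen
      · have hnmem : ch ∉ obj := by simpa using hm
        have hL : pvALoop obj (ch :: rest) c hs = pvALoop obj rest c hs := by
          simp [pvALoop, hbeq, hnmem]
        have hR : pvBFind obj (ch :: rest) hs 0 = pvBFind obj rest hs 1 := by
          simp [pvBFind, hnmem]
        rw [hL, hR]
        exact step_same hs hlen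

-- ===== VERDICT (by name: the statement is the Claim_ definition above) =====
theorem check_3cushion_score_spec : Claim_equal_check_3cushion_score := by
  intro ll cue _
  unfold Spec_check_3cushion_score check_3cushion_score check_3cushion_score_alt
  have key : ∀ obj : List String, obj.contains "C" = false →
      pvALoop obj ll 0 PySem.Set.empty =
      (match pvBFind obj ll PySem.Set.empty 0 with
      | (none, seen) =>
        if PySem.Set.len seen == 0 then (false, "목적구 전혀 못 맞힘")
        else (false, "목적구 1개만 맞힘")
      | (some i, _) =>
        if PySem.List.count (PySem.List.slice ll none (some (i : Int))) "C" ≥ 3 then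
          (true, "정상 득점(3쿠션)")
        else (false, "두 번째 목적구 전 쿠션 부족")) := by
    intro obj hCo
    rw [pvLoop_eq obj hCo ll 0 PySem.Set.empty (by simp [PySem.Set.empty])]
    rcases pvBFind obj ll PySem.Set.empty 0 with ⟨o, s⟩
    cases o with
    | none => rfl
    | some i => simp [PySem.List.slice_to_natCast, PySem.List.count_eq]
  by_cases hcue : cue == "white"
  · simp only [hcue, if_true]
    exact key ["R", "Y"] (by decide)
  · simp only [hcue, Bool.false_eq_true, if_false]
    exact key ["R", "W"] (by decide)
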